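-- pv_equiv track=rewrite | github.com/helperjby/Algorithm | 프로그래머스/lv0/120886. A로 B 만들기/A로 B 만들기.py | solution
-- ===== SOURCE A (Python) =====
-- def solution(before, after):
--     answer = 0
--     for i in before:
--         if i in after:
--             after = after.replace(i,'',1)
--     if len(after) > 0:
--         return 0
--     else:
--         return 1
-- ===== SOURCE B (Python) =====
-- def solution(before, after):
--     sb = sorted(before)
--     sa = sorted(after)
--     i = 0
--     j = 0
--     while i < len(sb) and j < len(sa):
--         if sb[i] == sa[j]:
--             i += 1
--             j += 1
--         elif sb[i] < sa[j]:
--             i += 1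
--         else:
--             break
--     return 1 if j == len(sa) else 0
-- ===== Notes on version B (the rewrite author's own statement) =====
-- stated objective: faster
-- what changed: Replaces A's per-character substring scan plus replace(c,'',1) rebuild of the remaining string with sorting both strings once and a single two-pointer merge pass that checks multiset containment.
import Mathlib
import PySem

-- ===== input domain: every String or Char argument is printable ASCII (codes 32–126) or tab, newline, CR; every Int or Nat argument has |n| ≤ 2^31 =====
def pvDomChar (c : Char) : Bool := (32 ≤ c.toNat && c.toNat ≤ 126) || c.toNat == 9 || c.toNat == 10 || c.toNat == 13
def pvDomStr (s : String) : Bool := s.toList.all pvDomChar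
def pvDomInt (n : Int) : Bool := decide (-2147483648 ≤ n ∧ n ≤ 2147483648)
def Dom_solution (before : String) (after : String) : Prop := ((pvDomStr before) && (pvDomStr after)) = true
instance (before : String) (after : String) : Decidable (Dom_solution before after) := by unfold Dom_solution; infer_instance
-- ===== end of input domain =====

-- B replaces A's per-character substring scan + replace(…,1) with sort-both-then-one-merge-pass
-- (alternative decomposition); return value only, no side effects.

-- ===== PORT A =====
-- hand port of after.replace(c, '', 1) for a single character c: remove the first occurrence
-- (exact: under the guard 'c in after' the replacement string is empty and count is 1)
def removeFirst (c : Char) : List Char → List Char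
  | [] => []
  | x :: xs => if x = c then xs else x :: removeFirst c xs

def solution (before : String) (after : String) : Int :=
  -- 'answer = 0' in A is dead code (never read); the loop threads 'after' through the chars of 'before'
  let fin := before.toList.foldl
    (fun aft c => if PySem.Chars.isIn [c] aft then removeFirst c aft else aft) after.toList
  if fin.length > 0 then 0 else 1

-- ===== PORT B =====
-- B's while loop over the two indices i, j; returns the final value of j
def mergeJ (sb sa : List Char) (i j : Nat) : Nat :=
  if hi : i < sb.length then
    if hj : j < sa.length then
      if sb[i] = sa[j] then mergeJ sb sa (i + 1) (j + 1)
      else if sb[i] < sa[j] then mergeJ sb sa (i + 1) j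
      else j
    else j
  else j
termination_by sb.length - i

def solution_alt (before : String) (after : String) : Int :=
  let sb := PySem.List.sorted before.toList (fun c => c) false
  let sa := PySem.List.sorted after.toList (fun c => c) false
  if mergeJ sb sa 0 0 = sa.length then 1 else 0

-- ===== PRECONDITION & SPEC =====
def Spec_solution (before : String) (after : String) (out : Int) : Prop := out = solution_alt before after
instance (before : String) (after : String) (out : Int) : Decidable (Spec_solution before after out) := by unfold Spec_solution; infer_instance

-- ===== CLAIM (what is proved, stated in full; the proofs are below) =====
def Claim_equal_solution : Prop := ∀ (before : String) (after : String), Dom_solution before after → Spec_solution before after (solution before after)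

-- ===== LEMMAS AND PROOFS =====

-- proof-side recursive description of B's merge pass: does sa embed greedily into sb?
def coversB : List Char → List Char → Bool
  | _, [] => true
  | [], _ :: _ => false
  | b :: sb, a :: sa =>
    if b = a then coversB sb sa
    else if b < a then coversB sb (a :: sa)
    else false

-- B's index loop succeeds exactly when the greedy merge over the list tails succeeds
theorem mergeJ_eq_len_iff (sb sa : List Char) (i j : Nat) (hj : j ≤ sa.length) :
    (mergeJ sb sa i j = sa.length ↔ coversB (sb.drop i) (sa.drop j) = true) := by
  fun_induction mergeJ sb sa i j with
  | case1 i j hi hjlt heq ih =>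
    rw [List.drop_eq_getElem_cons hi, List.drop_eq_getElem_cons hjlt]
    simp only [coversB, if_pos heq]
    exact ih hjlt
  | case2 i j hi hjlt heq hlt ih =>
    rw [List.drop_eq_getElem_cons hi]
    conv_rhs => rw [List.drop_eq_getElem_cons hjlt]
    simp only [coversB, if_neg heq, if_pos hlt]
    rw [← List.drop_eq_getElem_cons hjlt]
    exact ih hj
  | case3 i j hi hjlt heq hlt =>
    rw [List.drop_eq_getElem_cons hi, List.drop_eq_getElem_cons hjlt]
    simp only [coversB, if_neg heq, if_neg hlt]
    simp
    omega
  | case4 i j hi hjge =>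
    have : j = sa.length := by omega
    subst this
    simp [List.drop_length, coversB]
  | case5 i j hige =>
    have hdrop : sb.drop i = [] := List.drop_eq_nil_of_le (by omega)
    rw [hdrop]
    by_cases hje : j = sa.length
    · subst hje
      simp [List.drop_length, coversB]
    · have : j < sa.length := by omega
      rw [List.drop_eq_getElem_cons this]
      simp [coversB]
      omega

-- A's guarded remove-first step is List.erase (erase of a non-member is the identity)
theorem removeFirst_eq_erase (c : Char) (l : List Char) : removeFirst c l = l.erase c := by
  induction l with
  | nil => rfl
  | cons x xs ih =>
    by_cases h : x = c <;> simp [removeFirst, h, ih]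

theorem stepA_eq_erase (aft : List Char) (c : Char) :
    (if PySem.Chars.isIn [c] aft then removeFirst c aft else aft) = aft.erase c := by
  by_cases h : c ∈ aft
  · simp [(PySem.Chars.isIn_iff_infix [c] aft).mpr ((List.singleton_infix_iff c aft).mpr h),
      removeFirst_eq_erase]
  · have : PySem.Chars.isIn [c] aft = false :=
      (PySem.Chars.isIn_eq_false_iff [c] aft).mpr (fun hi => h ((List.singleton_infix_iff c aft).mp hi))
    simp [this, List.erase_of_not_mem h]

-- A's loop computes after.diff before
theorem foldA_eq_diff (bs aft : List Char) :
    bs.foldl (fun aft c => if PySem.Chars.isIn [c] aft then removeFirst c aft else aft) aft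
      = aft.diff bs := by
  rw [List.diff_eq_foldl]
  exact PySem.List.foldl_congr_mem bs _ _ aft (fun acc c _ => stepA_eq_erase acc c)

theorem diff_eq_nil_iff_subperm (l₁ l₂ : List Char) : l₁.diff l₂ = [] ↔ l₁.Subperm l₂ := by
  rw [List.subperm_iff_count]
  constructor
  · intro h a
    have := List.count_diff a l₁ l₂
    rw [h] at this
    simp at this
    omega
  · intro h
    rw [List.eq_nil_iff_forall_not_mem]
    intro a ha
    have := List.count_pos_iff.mpr ha
    rw [List.count_diff] at this
    have := h a
    omega

-- B's merge pass on sorted lists decides subpermutation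
theorem coversB_iff_subperm (sb sa : List Char)
    (hb : sb.Pairwise (· ≤ ·)) (ha : sa.Pairwise (· ≤ ·)) :
    coversB sb sa = true ↔ sa.Subperm sb := by
  induction sb generalizing sa with
  | nil =>
    cases sa with
    | nil => simp [coversB]
    | cons a sa => simp [coversB]
  | cons b sb ih =>
    have hb' := (List.pairwise_cons.mp hb).2
    have hble := (List.pairwise_cons.mp hb).1
    cases sa with
    | nil => simp [coversB, List.nil_subperm]
    | cons a sa =>
      have ha' := (List.pairwise_cons.mp ha).2
      have hale := (List.pairwise_cons.mp ha).1
      by_cases hba : b = a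
      · subst hba
        simp only [coversB, if_pos]
        rw [ih sa hb' ha', List.subperm_cons]
      · by_cases hlt : b < a
        · simp only [coversB, if_neg hba, if_pos hlt]
          rw [ih (a :: sa) hb' ha]
          constructor
          · intro h
            exact h.trans (List.sublist_cons_self b sb).subperm
          · intro h
            rw [List.subperm_ext_iff] at h ⊢
            intro x hx
            have hxa : a ≤ x := by
              rcases List.mem_cons.mp hx with he | hm
              · exact le_of_eq he.symm
              · exact hale x hm
            have hxb : x ≠ b := fun he => absurd hlt (by rw [← he]; exact not_lt.mpr hxa)
            have := h x hx
            simp only [List.count_cons] at this ⊢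
            simpa [Ne.symm hxb] using this
        · have hgt : a < b := lt_of_le_of_ne (not_lt.mp hlt) (fun he => hba he.symm)
          simp only [coversB, if_neg hba, if_neg hlt]
          apply iff_of_false (by simp)
          intro h
          have hmem : a ∈ b :: sb := h.subset (List.mem_cons_self)
          rcases List.mem_cons.mp hmem with he | hm
          · exact absurd hgt (by rw [he]; exact lt_irrefl b)
          · exact absurd (hble a hm) (not_le.mpr hgt)

-- ===== VERDICT (by name: the statement is the Claim_ definition above) =====
theorem solution_spec : Claim_equal_solution := by
  intro before after _
  unfold Spec_solution solution solution_alt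
  rw [foldA_eq_diff]
  have hperm : (after.toList.diff before.toList = []) ↔
      mergeJ (PySem.List.sorted before.toList (fun c => c) false)
             (PySem.List.sorted after.toList (fun c => c) false) 0 0
        = (PySem.List.sorted after.toList (fun c => c) false).length := by
    rw [mergeJ_eq_len_iff _ _ 0 0 (Nat.zero_le _), List.drop_zero, List.drop_zero]
    rw [diff_eq_nil_iff_subperm,
      coversB_iff_subperm _ _ (PySem.List.sorted_pairwise _ _) (PySem.List.sorted_pairwise _ _)]
    constructor
    · intro h
      exact ((PySem.List.sorted_perm after.toList (fun c => c) false).subperm.trans h).trans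
        (PySem.List.sorted_perm before.toList (fun c => c) false).symm.subperm
    · intro h
      exact ((PySem.List.sorted_perm after.toList (fun c => c) false).symm.subperm.trans h).trans
        (PySem.List.sorted_perm before.toList (fun c => c) false).subperm
  by_cases h : after.toList.diff before.toList = []
  · simp [h, hperm.mp h]
  · have hc : ¬ (mergeJ (PySem.List.sorted before.toList (fun c => c) false)
        (PySem.List.sorted after.toList (fun c => c) false) 0 0
        = (PySem.List.sorted after.toList (fun c => c) false).length) :=
      fun hcv => h (hperm.mpr hcv)
    rw [if_neg hc]
    simp [List.length_pos_iff.mpr h]
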